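-- pv_equiv track=rewrite | github.com/WWP-Architects-Planners/WWP_Revit_WWPTools | WWPTools.extension/WWPTools.tab/3. Project Management.panel/Import Area Key Schedule.pushbutton/Key Schedule-script.py | build_default_selections
-- ===== SOURCE A (Python) =====
-- SKIP_OPTION = "(Skip)"
--
-- KEY_NAME_OPTION = "Key Name"
--
-- def build_default_selections(headers, param_display_names):
--     defaults = []
--     name_lookup = {}
--     for name in param_display_names:
--         raw = (name or "").strip()
--         if not raw:
--             continue
--         key = _normalize_name(raw)
--         if key and key not in name_lookup:
--             name_lookup[key] = name
--         # Also support display names like "Param Name (Id 123)".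
--         base = raw
--         if base.endswith(")") and " (id " in _normalize_name(base):
--             base = base.rsplit(" (", 1)[0].strip()
--             base_key = _normalize_name(base)
--             if base_key and base_key not in name_lookup:
--                 name_lookup[base_key] = name
--     for header in headers:
--         header_text = (header or "").strip()
--         if not header_text:
--             defaults.append(SKIP_OPTION)
--             continue
--         header_lower = _normalize_name(header_text)
--         if header_lower in ("key", "key name", "keyname"):
--             defaults.append(KEY_NAME_OPTION)
--             continue
--         if header_lower in name_lookup:
--             defaults.append(name_lookup[header_lower])
--             continue
--         defaults.append(SKIP_OPTION)
--     return defaults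
--
-- def _normalize_name(value):
--     if value is None:
--         return ""
--     return str(value).strip().lower()
-- ===== SOURCE B (Python) =====
-- SKIP_OPTION = "(Skip)"
--
-- KEY_NAME_OPTION = "Key Name"
--
--
-- def _norm(value):
--     return (value or "").strip().lower()
--
--
-- def _default_for(header, param_display_names):
--     text = (header or "").strip()
--     if not text:
--         return SKIP_OPTION
--     key = _norm(text)
--     if key in ("key", "key name", "keyname"):
--         return KEY_NAME_OPTION
--     for name in param_display_names:
--         raw = (name or "").strip()
--         if not raw:
--             continue
--         if _norm(raw) == key:
--             return name
--         if raw.endswith(")") and " (id " in _norm(raw):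
--             base = raw.rsplit(" (", 1)[0].strip()
--             if _norm(base) == key:
--                 return name
--     return SKIP_OPTION
--
--
-- def build_default_selections(headers, param_display_names):
--     return [_default_for(h, param_display_names) for h in headers]
-- ===== Notes on version B (the rewrite author's own statement) =====
-- stated objective: alternative
-- what changed: A precomputes a normalized-name lookup dict over all params and then resolves each header by dict lookup; B drops the dict entirely and resolves each header independently by a first-match linear scan of param_display_names (checking the normalized name and, when gated by the '(Id ...)' pattern, the normalized base name).
import Mathlib
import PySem

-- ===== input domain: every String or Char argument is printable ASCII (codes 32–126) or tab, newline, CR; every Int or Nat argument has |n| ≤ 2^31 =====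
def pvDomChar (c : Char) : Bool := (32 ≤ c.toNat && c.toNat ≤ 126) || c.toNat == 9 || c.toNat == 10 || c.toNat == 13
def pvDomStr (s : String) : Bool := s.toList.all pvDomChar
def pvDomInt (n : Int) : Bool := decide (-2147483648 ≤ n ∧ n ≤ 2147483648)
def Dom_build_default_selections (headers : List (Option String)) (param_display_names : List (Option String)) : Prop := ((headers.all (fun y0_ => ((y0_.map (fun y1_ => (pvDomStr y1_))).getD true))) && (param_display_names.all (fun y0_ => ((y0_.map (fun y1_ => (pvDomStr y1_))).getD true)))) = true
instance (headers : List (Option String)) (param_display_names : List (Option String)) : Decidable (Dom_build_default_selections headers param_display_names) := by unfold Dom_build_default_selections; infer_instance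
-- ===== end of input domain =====

-- B replaces A's precomputed lookup dict by a per-header first-match linear scan of the
-- parameter names (objective: alternative decomposition, same results, not faster).

-- ===== PORT A =====

def SKIP_OPTION : String := "(Skip)"

def KEY_NAME_OPTION : String := "Key Name"

-- _normalize_name(value) for a str argument (every call site passes a str, so the
-- 'value is None' branch is unreachable): str(value).strip().lower()
def pyNormName (s : String) : String := PySem.Str.lower (PySem.Str.strip s)

-- raw.rsplit(" (", 1)[0]: the prefix before the LAST occurrence of " ("
-- (the whole string when " (" is absent); hand-ported, exact
def rsplitHead (s : String) : String :=
  let i := PySem.Str.rfind s " ("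
  if i < 0 then s else String.ofList (s.toList.take i.toNat)

-- the body of A's first loop: one param_display_names entry added to name_lookup
def buildLookupStep (d : PySem.Dict String String) (name : Option String) : PySem.Dict String String :=
  let nm := name.getD ""              -- (name or "")
  let raw := PySem.Str.strip nm
  if raw = "" then d
  else
    let key := pyNormName raw
    let d1 := if key ≠ "" ∧ d.contains key = false then d.insert key nm else d
    if PySem.Str.endswith raw ")" ∧ PySem.Str.isIn " (id " (pyNormName raw) then
      let base := PySem.Str.strip (rsplitHead raw)
      let base_key := pyNormName base
      if base_key ≠ "" ∧ d1.contains base_key = false then d1.insert base_key nm else d1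
    else d1

def build_default_selections (headers : List (Option String)) (param_display_names : List (Option String)) : List String :=
  let name_lookup := param_display_names.foldl buildLookupStep PySem.Dict.empty
  headers.foldl (fun defaults header =>
    let header_text := PySem.Str.strip (header.getD "")
    if header_text = "" then defaults ++ [SKIP_OPTION]
    else
      let header_lower := pyNormName header_text
      if header_lower = "key" ∨ header_lower = "key name" ∨ header_lower = "keyname" then
        defaults ++ [KEY_NAME_OPTION]
      else
        match name_lookup.get? header_lower with
        | some v => defaults ++ [v]
        | none => defaults ++ [SKIP_OPTION]) []

-- ===== PORT B =====

-- Source B's loop over param_display_names: the first entry whose normalized name or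
-- normalized "(Id …)"-base equals key (returns the entry itself; it is a str here
-- since raw is non-empty)
def findMatch (key : String) : List (Option String) → Option String
  | [] => none
  | name :: rest =>
    let nm := name.getD ""
    let raw := PySem.Str.strip nm
    if raw = "" then findMatch key rest
    else if pyNormName raw = key then some nm
    else if PySem.Str.endswith raw ")" ∧ PySem.Str.isIn " (id " (pyNormName raw) then
      let base := PySem.Str.strip (rsplitHead raw)
      if pyNormName base = key then some nm else findMatch key rest
    else findMatch key rest

-- Source B's _default_for
def defaultFor (header : Option String) (param_display_names : List (Option String)) : String :=
  let text := PySem.Str.strip (header.getD "")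
  if text = "" then SKIP_OPTION
  else
    let key := pyNormName text
    if key = "key" ∨ key = "key name" ∨ key = "keyname" then KEY_NAME_OPTION
    else
      match findMatch key param_display_names with
      | some nm => nm
      | none => SKIP_OPTION

def build_default_selections_alt (headers : List (Option String)) (param_display_names : List (Option String)) : List String :=
  headers.map (fun h => defaultFor h param_display_names)

-- ===== PRECONDITION & SPEC =====
def Spec_build_default_selections (headers : List (Option String)) (param_display_names : List (Option String)) (out : List String) : Prop := out = build_default_selections_alt headers param_display_names
instance (headers : List (Option String)) (param_display_names : List (Option String)) (out : List String) : Decidable (Spec_build_default_selections headers param_display_names out) := by unfold Spec_build_default_selections; infer_instance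

-- ===== CLAIM (what is proved, stated in full; the proofs are below) =====
def Claim_equal_build_default_selections : Prop := ∀ (headers : List (Option String)) (param_display_names : List (Option String)), Dom_build_default_selections headers param_display_names → Spec_build_default_selections headers param_display_names (build_default_selections headers param_display_names)

-- ===== LEMMAS AND PROOFS =====

theorem dropWhile_dropWhile_self {α : Type} (p : α → Bool) (l : List α) :
    List.dropWhile p (List.dropWhile p l) = List.dropWhile p l := by
  induction l with
  | nil => rfl
  | cons a l ih => by_cases h : p a <;> simp [h, ih]

theorem dropWhile_eq_self_of_prefix {α : Type} (p : α → Bool) {x y : List α}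
    (hpre : x <+: y) (hy : List.dropWhile p y = y) : List.dropWhile p x = x := by
  cases x with
  | nil => rfl
  | cons a x' =>
    obtain ⟨t, rfl⟩ := hpre
    by_cases h : p a
    · exfalso
      have hstep : List.dropWhile p ((a :: x') ++ t) = List.dropWhile p (x' ++ t) := by
        simp [h]
      have e : List.dropWhile p (x' ++ t) = (a :: x') ++ t := hstep.symm.trans hy
      have hlen := congrArg List.length e
      have hle := List.length_dropWhile_le p (x' ++ t)
      simp [List.length_append] at hlen hle
      omega
    · simp [h]

theorem strip_strip (l : List Char) : PySem.Chars.strip (PySem.Chars.strip l) = PySem.Chars.strip l := by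
  unfold PySem.Chars.strip PySem.Chars.lstrip PySem.Chars.rstrip
  set p := PySem.Chars.isspace with hp
  set m := List.dropWhile p l with hm
  have hmm : List.dropWhile p m = m := by rw [hm]; exact dropWhile_dropWhile_self p l
  have hsucc : List.dropWhile p m.reverse <:+ m.reverse := List.dropWhile_suffix p
  have hrm : (List.dropWhile p m.reverse).reverse <+: m := by
    have h2 := (List.reverse_prefix (l₁ := List.dropWhile p m.reverse) (l₂ := m.reverse)).mpr hsucc
    simpa using h2
  have h1 : List.dropWhile p (List.dropWhile p m.reverse).reverse = (List.dropWhile p m.reverse).reverse :=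
    dropWhile_eq_self_of_prefix p hrm hmm
  rw [h1, List.reverse_reverse, dropWhile_dropWhile_self]

theorem str_strip_strip (s : String) : PySem.Str.strip (PySem.Str.strip s) = PySem.Str.strip s := by
  apply String.toList_inj.mp
  simp only [PySem.Str.toList_strip]
  exact strip_strip s.toList

-- pyNormName of an already-stripped string is non-empty whenever that string is
theorem pyNormName_strip_ne (s : String) (h : PySem.Str.strip s ≠ "") :
    pyNormName (PySem.Str.strip s) ≠ "" := by
  intro hc
  apply h
  apply String.toList_eq_nil_iff.mp
  unfold pyNormName at hc
  have h2 := congrArg String.toList hc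
  rw [PySem.Str.toList_lower] at h2
  unfold PySem.Chars.lower at h2
  simp only [PySem.Str.toList_strip, String.toList_empty, List.map_eq_nil_iff] at h2
  rw [← PySem.Str.toList_strip, ← PySem.Str.toList_strip] at h2
  rw [str_strip_strip] at h2
  exact h2

-- a guarded first-wins insert never disturbs a key that is already bound
theorem get?_guarded_insert (d : PySem.Dict String String) (k nm t : String)
    {v : String} (h : d.get? t = some v) :
    (if k ≠ "" ∧ d.contains k = false then d.insert k nm else d).get? t = some v := by
  split_ifs with hg
  · rw [PySem.Dict.get?_insert]
    split_ifs with he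
    · subst he
      rw [PySem.Dict.contains_eq_isSome_get?, h] at hg
      simp at hg
    · exact h
  · exact h

-- a guarded insert of a key ≠ t does not change the binding of t
theorem get?_guarded_insert_ne (d : PySem.Dict String String) (k nm t : String) (hk : k ≠ t) :
    (if k ≠ "" ∧ d.contains k = false then d.insert k nm else d).get? t = d.get? t := by
  split_ifs with hg
  · rw [PySem.Dict.get?_insert, if_neg (fun he => hk he.symm)]
  · rfl

theorem step_of_some (d : PySem.Dict String String) (p : Option String) (t v : String)
    (h : d.get? t = some v) : (buildLookupStep d p).get? t = some v := by
  simp only [buildLookupStep]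
  by_cases hraw : PySem.Str.strip (p.getD "") = ""
  · simpa [hraw] using h
  · simp only [if_neg hraw]
    by_cases hc2 : (PySem.Str.endswith (PySem.Str.strip (p.getD "")) ")" = true ∧
        PySem.Str.isIn " (id " (pyNormName (PySem.Str.strip (p.getD ""))) = true)
    · rw [if_pos hc2]
      exact get?_guarded_insert _ _ _ _ (get?_guarded_insert _ _ _ _ h)
    · rw [if_neg hc2]
      exact get?_guarded_insert _ _ _ _ h

theorem foldl_step_of_some (params : List (Option String)) (d : PySem.Dict String String)
    (t v : String) (h : d.get? t = some v) :
    (params.foldl buildLookupStep d).get? t = some v := by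
  induction params generalizing d with
  | nil => simpa using h
  | cons p rest ih => rw [List.foldl_cons]; exact ih _ (step_of_some d p t v h)

theorem foldl_step_of_none (params : List (Option String)) (d : PySem.Dict String String)
    (t : String) (ht : t ≠ "") (h : d.get? t = none) :
    (params.foldl buildLookupStep d).get? t = findMatch t params := by
  induction params generalizing d with
  | nil => simpa using h
  | cons p rest ih =>
    rw [List.foldl_cons]
    by_cases hraw : PySem.Str.strip (p.getD "") = ""
    · have hstep : buildLookupStep d p = d := by simp [buildLookupStep, hraw]
      have hfm : findMatch t (p :: rest) = findMatch t rest := by simp [findMatch, hraw]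
      rw [hstep, hfm]
      exact ih d h
    · have hcontains : d.contains t = false := by
        rw [PySem.Dict.contains_eq_isSome_get?, h]; rfl
      by_cases hk : pyNormName (PySem.Str.strip (p.getD "")) = t
      · -- the normalized name itself matches the header key
        have hd1 : (if pyNormName (PySem.Str.strip (p.getD "")) ≠ "" ∧
            d.contains (pyNormName (PySem.Str.strip (p.getD ""))) = false then
              d.insert (pyNormName (PySem.Str.strip (p.getD ""))) (p.getD "") else d).get? t
            = some (p.getD "") := by
          rw [if_pos ⟨by rw [hk]; exact ht, by rw [hk]; exact hcontains⟩,
            PySem.Dict.get?_insert, if_pos hk.symm]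
        have hstep : (buildLookupStep d p).get? t = some (p.getD "") := by
          simp only [buildLookupStep, if_neg hraw]
          by_cases hc2 : (PySem.Str.endswith (PySem.Str.strip (p.getD "")) ")" = true ∧
              PySem.Str.isIn " (id " (pyNormName (PySem.Str.strip (p.getD ""))) = true)
          · rw [if_pos hc2]
            exact get?_guarded_insert _ _ _ _ hd1
          · rw [if_neg hc2]
            exact hd1
        rw [foldl_step_of_some rest _ t _ hstep]
        simp only [findMatch]
        rw [if_neg hraw, if_pos hk]
      · -- the normalized name does not match
        have hd1 : (if pyNormName (PySem.Str.strip (p.getD "")) ≠ "" ∧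
            d.contains (pyNormName (PySem.Str.strip (p.getD ""))) = false then
              d.insert (pyNormName (PySem.Str.strip (p.getD ""))) (p.getD "") else d).get? t
            = none := by
          rw [get?_guarded_insert_ne _ _ _ _ hk]; exact h
        by_cases hc2 : (PySem.Str.endswith (PySem.Str.strip (p.getD "")) ")" = true ∧
            PySem.Str.isIn " (id " (pyNormName (PySem.Str.strip (p.getD ""))) = true)
        · by_cases hb : pyNormName (PySem.Str.strip (rsplitHead (PySem.Str.strip (p.getD "")))) = t
          · -- the "(Id …)" base name matches
            have hbc : (if pyNormName (PySem.Str.strip (p.getD "")) ≠ "" ∧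
                d.contains (pyNormName (PySem.Str.strip (p.getD ""))) = false then
                  d.insert (pyNormName (PySem.Str.strip (p.getD ""))) (p.getD "") else d).contains
                (pyNormName (PySem.Str.strip (rsplitHead (PySem.Str.strip (p.getD ""))))) = false := by
              rw [hb, PySem.Dict.contains_eq_isSome_get?, hd1]; rfl
            have hstep : (buildLookupStep d p).get? t = some (p.getD "") := by
              simp only [buildLookupStep, if_neg hraw, if_pos hc2]
              rw [if_pos ⟨by rw [hb]; exact ht, hbc⟩, PySem.Dict.get?_insert, if_pos hb.symm]
            rw [foldl_step_of_some rest _ t _ hstep]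
            simp only [findMatch]
            rw [if_neg hraw, if_neg hk, if_pos hc2, if_pos hb]
          · -- neither key matches: the binding of t is untouched
            have hstep : (buildLookupStep d p).get? t = none := by
              simp only [buildLookupStep, if_neg hraw, if_pos hc2]
              rw [get?_guarded_insert_ne _ _ _ _ hb]
              exact hd1
            rw [ih _ hstep]
            simp only [findMatch]
            rw [if_neg hraw, if_neg hk, if_pos hc2, if_neg hb]
        · have hstep : (buildLookupStep d p).get? t = none := by
            simp only [buildLookupStep, if_neg hraw, if_neg hc2]
            exact hd1
          rw [ih _ hstep]
          simp only [findMatch]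
          rw [if_neg hraw, if_neg hk, if_neg hc2]

theorem lookup_eq_findMatch (params : List (Option String)) (t : String) (ht : t ≠ "") :
    (params.foldl buildLookupStep PySem.Dict.empty).get? t = findMatch t params :=
  foldl_step_of_none params PySem.Dict.empty t ht (by simp [PySem.Dict.get?, PySem.Dict.empty])

theorem headers_loop (params : List (Option String)) (headers : List (Option String))
    (acc : List String) :
    headers.foldl (fun defaults header =>
      let header_text := PySem.Str.strip (header.getD "")
      if header_text = "" then defaults ++ [SKIP_OPTION]
      else
        let header_lower := pyNormName header_text
        if header_lower = "key" ∨ header_lower = "key name" ∨ header_lower = "keyname" then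
          defaults ++ [KEY_NAME_OPTION]
        else
          match (params.foldl buildLookupStep PySem.Dict.empty).get? header_lower with
          | some v => defaults ++ [v]
          | none => defaults ++ [SKIP_OPTION]) acc
    = acc ++ headers.map (fun h => defaultFor h params) := by
  induction headers generalizing acc with
  | nil => simp
  | cons h hs ih =>
    rw [List.foldl_cons, ih, List.map_cons]
    have hbody : (let header_text := PySem.Str.strip (h.getD "")
      if header_text = "" then acc ++ [SKIP_OPTION]
      else
        let header_lower := pyNormName header_text
        if header_lower = "key" ∨ header_lower = "key name" ∨ header_lower = "keyname" then
          acc ++ [KEY_NAME_OPTION]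
        else
          match (params.foldl buildLookupStep PySem.Dict.empty).get? header_lower with
          | some v => acc ++ [v]
          | none => acc ++ [SKIP_OPTION]) = acc ++ [defaultFor h params] := by
      unfold defaultFor
      by_cases h0 : PySem.Str.strip (h.getD "") = ""
      · simp [h0]
      · simp only [if_neg h0]
        by_cases h1 : pyNormName (PySem.Str.strip (h.getD "")) = "key" ∨
            pyNormName (PySem.Str.strip (h.getD "")) = "key name" ∨
            pyNormName (PySem.Str.strip (h.getD "")) = "keyname"
        · simp [h1]
        · simp only [if_neg h1]
          rw [lookup_eq_findMatch params _ (pyNormName_strip_ne _ h0)]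
          cases findMatch (pyNormName (PySem.Str.strip (h.getD ""))) params <;> rfl
    rw [hbody, List.append_assoc, List.singleton_append]

-- ===== VERDICT (by name: the statement is the Claim_ definition above) =====
theorem build_default_selections_spec : Claim_equal_build_default_selections := by
  intro headers params _
  unfold Spec_build_default_selections build_default_selections build_default_selections_alt
  simpa using headers_loop params headers []
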